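-- pv_equiv track=rewrite | github.com/A-SHI-M/Cse423_Lab | final_project(withcolor).py | zone_converter
-- ===== SOURCE A (Python) =====
-- def zone_converter(x,y,arr):
--     all_points = [[],[],[],[],[],[],[],[]]
--     for i in range(0,len(arr)):
--         m = arr[i]
--         for j in range(8):
--             if j == 0 :
--                 all_points[j].append((m[1]+x,m[0]+y))
--             elif j == 1:
--                 all_points[j].append((m[0]+x,m[1]+y))
--             elif j == 2:
--                 all_points[j].append((-m[0]+x,m[1]+y))
--             elif j == 3:
--                 all_points[j].append((-m[1]+x,m[0]+y))
--             elif j == 4: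
--                 all_points[j].append((-m[1]+x,-m[0]+y))
--             elif j == 5:
--                 all_points[j].append((-m[0]+x,-m[1]+y))
--             elif j == 6:
--                 all_points[j].append((m[0]+x,-m[1]+y))
--             elif j == 7:
--                 all_points[j].append((m[1]+x,-m[0]+y))
--
--     return all_points
-- ===== SOURCE B (Python) =====
-- def zone_converter(x, y, arr):
--     # Symmetry derivation: scan arr only twice (octants 0 and 1), then obtain the
--     # other six lists by reflecting already-built point lists about the vertical
--     # axis px -> 2x - px and the horizontal axis py -> 2y - py.
--     o0 = [(m[1] + x, m[0] + y) for m in arr]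
--     o1 = [(m[0] + x, m[1] + y) for m in arr]
--
--     def mirror_x(pts):
--         return [(2 * x - px, py) for (px, py) in pts]
--
--     def mirror_y(pts):
--         return [(px, 2 * y - py) for (px, py) in pts]
--
--     upper = [o0, o1, mirror_x(o1), mirror_x(o0)]
--     return upper + [mirror_y(o) for o in reversed(upper)]
-- ===== Notes on version B (the rewrite author's own statement) =====
-- stated objective: alternative
-- what changed: Instead of one pass over arr filling all 8 lists via an 8-way if-chain, B scans arr only twice (octants 0 and 1) and derives the other six lists by reflecting already-built point lists about the vertical and horizontal axes, assembling the lower half as mirrored reversals of the upper half.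
import Mathlib
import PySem

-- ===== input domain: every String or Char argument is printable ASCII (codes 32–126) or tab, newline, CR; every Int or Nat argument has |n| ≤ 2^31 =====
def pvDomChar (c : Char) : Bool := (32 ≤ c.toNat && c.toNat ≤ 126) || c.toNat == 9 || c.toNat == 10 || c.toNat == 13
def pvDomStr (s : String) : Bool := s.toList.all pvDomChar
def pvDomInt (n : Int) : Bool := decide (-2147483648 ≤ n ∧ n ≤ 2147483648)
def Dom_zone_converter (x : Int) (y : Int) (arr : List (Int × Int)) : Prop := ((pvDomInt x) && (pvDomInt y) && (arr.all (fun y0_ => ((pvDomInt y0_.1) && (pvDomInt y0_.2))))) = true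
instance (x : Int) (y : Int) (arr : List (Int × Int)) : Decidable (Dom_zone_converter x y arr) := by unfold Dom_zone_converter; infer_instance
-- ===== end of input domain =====

-- B scans arr only twice and derives the remaining six octant lists by axis reflections of built lists (alternative decomposition, same cost).

-- ===== PORT A =====
-- one pass over arr; per point the unrolled j = 0..7 if-chain appends to each of the 8 lists
def zone_converter_step (x : Int) (y : Int) (s : List (List (Int × Int))) (m : Int × Int) :
    List (List (Int × Int)) :=
  match s with
  | [a0, a1, a2, a3, a4, a5, a6, a7] =>
      [a0 ++ [(m.2 + x, m.1 + y)],
       a1 ++ [(m.1 + x, m.2 + y)],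
       a2 ++ [(-m.1 + x, m.2 + y)],
       a3 ++ [(-m.2 + x, m.1 + y)],
       a4 ++ [(-m.2 + x, -m.1 + y)],
       a5 ++ [(-m.1 + x, -m.2 + y)],
       a6 ++ [(m.1 + x, -m.2 + y)],
       a7 ++ [(m.2 + x, -m.1 + y)]]
  | s => s

def zone_converter (x : Int) (y : Int) (arr : List (Int × Int)) : List (List (Int × Int)) :=
  arr.foldl (zone_converter_step x y) [[], [], [], [], [], [], [], []]

-- ===== PORT B =====
def zc_mirror_x (x : Int) (pts : List (Int × Int)) : List (Int × Int) :=
  pts.map (fun p => (2 * x - p.1, p.2))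

def zc_mirror_y (y : Int) (pts : List (Int × Int)) : List (Int × Int) :=
  pts.map (fun p => (p.1, 2 * y - p.2))

def zone_converter_alt (x : Int) (y : Int) (arr : List (Int × Int)) : List (List (Int × Int)) :=
  let o0 := arr.map (fun m => (m.2 + x, m.1 + y))
  let o1 := arr.map (fun m => (m.1 + x, m.2 + y))
  let upper := [o0, o1, zc_mirror_x x o1, zc_mirror_x x o0]
  upper ++ (upper.reverse.map (zc_mirror_y y))

-- ===== PRECONDITION & SPEC =====
def Spec_zone_converter (x : Int) (y : Int) (arr : List (Int × Int)) (out : List (List (Int × Int))) : Prop := out = zone_converter_alt x y arr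
instance (x : Int) (y : Int) (arr : List (Int × Int)) (out : List (List (Int × Int))) : Decidable (Spec_zone_converter x y arr out) := by unfold Spec_zone_converter; infer_instance

-- ===== CLAIM =====
def Claim_equal_zone_converter : Prop := ∀ (x : Int) (y : Int) (arr : List (Int × Int)), Dom_zone_converter x y arr → Spec_zone_converter x y arr (zone_converter x y arr)

-- ===== LEMMAS AND PROOFS =====
theorem zone_converter_foldl (x y : Int) (arr : List (Int × Int))
    (a0 a1 a2 a3 a4 a5 a6 a7 : List (Int × Int)) :
    arr.foldl (zone_converter_step x y) [a0, a1, a2, a3, a4, a5, a6, a7] =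
      [a0 ++ arr.map (fun m => (m.2 + x, m.1 + y)),
       a1 ++ arr.map (fun m => (m.1 + x, m.2 + y)),
       a2 ++ arr.map (fun m => (-m.1 + x, m.2 + y)),
       a3 ++ arr.map (fun m => (-m.2 + x, m.1 + y)),
       a4 ++ arr.map (fun m => (-m.2 + x, -m.1 + y)),
       a5 ++ arr.map (fun m => (-m.1 + x, -m.2 + y)),
       a6 ++ arr.map (fun m => (m.1 + x, -m.2 + y)),
       a7 ++ arr.map (fun m => (m.2 + x, -m.1 + y))] := by
  induction arr generalizing a0 a1 a2 a3 a4 a5 a6 a7 with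
  | nil => simp
  | cons m t ih =>
      simp only [List.foldl_cons, zone_converter_step, List.map_cons, ih, List.append_assoc,
        List.singleton_append]

-- ===== VERDICT =====
theorem zone_converter_spec : Claim_equal_zone_converter := by
  intro x y arr _
  show _ = _
  simp only [zone_converter, zone_converter_foldl, List.nil_append, zone_converter_alt,
    zc_mirror_x, zc_mirror_y, List.map_map, List.reverse_cons, List.reverse_nil,
    List.nil_append, List.cons_append, List.map_cons, List.map_nil, List.cons.injEq, and_true]
  refine ⟨?_, ?_, ?_, ?_, ?_, ?_, ?_, ?_⟩ <;>
    first
      | trivial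
      | (apply List.map_congr_left; intro m _; simp [Function.comp, Prod.ext_iff]; omega)
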